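-- pv_equiv track=rewrite | github.com/dombunnett/ReducedFiniteDimensionalModules | reduced-modules.py | property_check
-- ===== SOURCE A (Python) =====
-- def property_check(A,B):
--     T1set = B.copy()    # We copy the second set. If an element satisfies the
--                         # property we remove it from this set.
--     T1 = False
--
--     for (a,b) in B:
--         if a>=-b and (a-1,b) in A and a>1:
--             T1set.remove((a,b))
--
--         if -b>=a and (a,b+1) in A and b<-1:
--             T1set.add((a,b))
--             T1set.remove((a,b))
--
--     if len(T1set)==0:   # If this set is empty, the T1 property holds and thus
--                         # T1 is true
--         T1 = True
--     return T1
-- ===== SOURCE B (Python) =====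
-- def property_check(A, B):
--     # Single pass with early exit: True iff every pair of B satisfies one of
--     # the two removal conditions (the add-then-remove in A nets to a removal).
--     for (a, b) in B:
--         if not ((a >= -b and (a - 1, b) in A and a > 1)
--                 or (-b >= a and (a, b + 1) in A and b < -1)):
--             return False
--     return True
-- ===== Notes on version B (the rewrite author's own statement) =====
-- stated objective: simpler
-- what changed: B drops the copied working set entirely: instead of building T1set, removing the qualifying pairs (including A's add-then-remove, which nets to a plain removal) and testing len()==0, B makes one pass over B with early exit, returning False at the first pair that satisfies neither condition.
import Mathlib
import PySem

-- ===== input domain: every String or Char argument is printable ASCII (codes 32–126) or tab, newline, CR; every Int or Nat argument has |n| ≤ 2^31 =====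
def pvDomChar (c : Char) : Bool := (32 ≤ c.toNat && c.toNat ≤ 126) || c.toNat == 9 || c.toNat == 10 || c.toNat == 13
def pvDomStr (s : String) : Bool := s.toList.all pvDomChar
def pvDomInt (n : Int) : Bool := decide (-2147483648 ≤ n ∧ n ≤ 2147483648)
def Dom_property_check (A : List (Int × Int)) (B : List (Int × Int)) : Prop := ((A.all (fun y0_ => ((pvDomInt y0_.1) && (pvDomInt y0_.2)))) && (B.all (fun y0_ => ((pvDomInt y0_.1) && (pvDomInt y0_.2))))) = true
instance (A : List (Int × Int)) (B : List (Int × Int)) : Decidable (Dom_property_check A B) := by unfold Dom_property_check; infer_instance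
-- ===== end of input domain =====

-- B replaces A's copied working set (build T1set, remove qualifying pairs, test len==0)
-- by a single early-exit pass testing that every pair of B satisfies one of the two conditions.

-- ===== PORT A =====
-- Loop body of A: the two 'if's on T1set, in order; 'none' = a raised exception
-- (set.remove on an absent element).  PySem.Set models the Python sets A and B.
def pvStep_property_check (A : List (Int × Int)) (so : Option (PySem.Set (Int × Int)))
    (p : Int × Int) : Option (PySem.Set (Int × Int)) :=
  (if decide (p.1 ≥ -p.2) && A.contains (p.1 - 1, p.2) && decide (p.1 > 1) then
      so.bind (fun s => PySem.Set.remove? s p)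
    else so).bind (fun s =>
      if decide (-p.2 ≥ p.1) && A.contains (p.1, p.2 + 1) && decide (p.2 < -1) then
        PySem.Set.remove? (PySem.Set.add s p) p
      else some s)

def property_check (A : List (Int × Int)) (B : List (Int × Int)) : Bool :=
  -- T1set = B.copy(); T1 = False
  match B.foldl (pvStep_property_check A) (some B) with
  | some T1set => decide (PySem.Set.len T1set = 0)  -- if len(T1set)==0: T1 = True; return T1
  | none => false                                   -- unreachable under Pre_ (Python raised)

-- ===== PORT B =====
def property_check_alt (A : List (Int × Int)) (B : List (Int × Int)) : Bool :=
  B.all (fun p =>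
    (decide (p.1 ≥ -p.2) && A.contains (p.1 - 1, p.2) && decide (p.1 > 1)) ||
    (decide (-p.2 ≥ p.1) && A.contains (p.1, p.2 + 1) && decide (p.2 < -1)))

-- ===== PRECONDITION & SPEC =====
-- A's parameters are Python SETS; a list with a repeated pair does not represent one
-- (fed such a raw list, A can raise: list has no .add / .remove of an absent copy), so
-- Pre_ requires B to be duplicate-free.  A's set is only tested for emptiness, so its
-- iteration order cannot matter; duplicates in A are harmless (membership only).
def Pre_property_check (A : List (Int × Int)) (B : List (Int × Int)) : Prop := B.Nodup
instance (A : List (Int × Int)) (B : List (Int × Int)) : Decidable (Pre_property_check A B) := by unfold Pre_property_check; infer_instance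
def pvWitness_property_check : (List (Int × Int)) × (List (Int × Int)) := ([(1, -1)], [(2, -1), (0, 0)])
def Spec_property_check (A : List (Int × Int)) (B : List (Int × Int)) (out : Bool) : Prop := out = property_check_alt A B
instance (A : List (Int × Int)) (B : List (Int × Int)) (out : Bool) : Decidable (Spec_property_check A B out) := by unfold Spec_property_check; infer_instance

-- ===== CLAIM (what is proved, stated in full; the proofs are below) =====
def Claim_equal_property_check : Prop := ∀ (A : List (Int × Int)) (B : List (Int × Int)), Dom_property_check A B → Pre_property_check A B → Spec_property_check A B (property_check A B)

-- ===== LEMMAS AND PROOFS =====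

-- The condition tested by B, as a named predicate for the proofs.
def pvCond (A : List (Int × Int)) (p : Int × Int) : Bool :=
  (decide (p.1 ≥ -p.2) && A.contains (p.1 - 1, p.2) && decide (p.1 > 1)) ||
  (decide (-p.2 ≥ p.1) && A.contains (p.1, p.2 + 1) && decide (p.2 < -1))

lemma pvStep_some (A : List (Int × Int)) (s : PySem.Set (Int × Int)) (p : Int × Int)
    (hp : p ∈ s) :
    pvStep_property_check A (some s) p =
      some (if pvCond A p then s.filter (fun y => !(y == p)) else s) := by
  unfold pvStep_property_check pvCond
  by_cases h1 : ((-p.2 ≤ p.1 ∧ (p.1 - 1, p.2) ∈ A) ∧ 1 < p.1) <;>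
  by_cases h2 : ((p.1 ≤ -p.2 ∧ (p.1, p.2 + 1) ∈ A) ∧ p.2 < -1) <;>
    simp [h1, h2, hp, PySem.Set.remove?, PySem.Set.discard, PySem.Set.add,
      List.filter_append, List.filter_filter, ge_iff_le, gt_iff_lt]

lemma pvFoldl_inv (A : List (Int × Int)) :
    ∀ (l s : List (Int × Int)), l.Nodup → (∀ x ∈ l, x ∈ s) →
      l.foldl (pvStep_property_check A) (some s) =
        some (s.filter (fun x => !(l.contains x && pvCond A x))) := by
  intro l
  induction l with
  | nil => intro s _ _; simp
  | cons p t ih =>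
    intro s hnd hsub
    have hp : p ∈ s := hsub p (by simp)
    have hndt : t.Nodup := hnd.of_cons
    have hpt : p ∉ t := (List.nodup_cons.mp hnd).1
    rw [List.foldl_cons, pvStep_some A s p hp]
    by_cases hc : pvCond A p = true
    · rw [if_pos hc,
        ih (s.filter (fun y => !(y == p))) hndt
          (by intro x hx
              simp only [List.mem_filter]
              exact ⟨hsub x (by simp [hx]), by
                simp only [Bool.not_eq_eq_eq_not, Bool.not_true, beq_eq_false_iff_ne]
                exact fun he => hpt (he ▸ hx)⟩)]
      congr 1
      rw [List.filter_filter]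
      apply List.filter_congr
      intro x _
      by_cases hxp : x = p
      · subst hxp; simp [hc]
      · simp [hxp]
    · rw [if_neg hc,
        ih s hndt (fun x hx => hsub x (by simp [hx]))]
      congr 1
      apply List.filter_congr
      intro x _
      by_cases hxp : x = p
      · subst hxp
        simp [Bool.not_eq_true] at hc
        simp [hc]
      · simp [hxp]

-- ===== VERDICT (by name: the statement is the Claim_ definition above) =====
theorem property_check_spec : Claim_equal_property_check := by
  intro A B _ hpre
  unfold Spec_property_check property_check
  rw [pvFoldl_inv A B B hpre (fun x hx => hx)]
  have hfil : B.filter (fun x => !(B.contains x && pvCond A x)) = B.filter (fun x => !pvCond A x) :=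
    List.filter_congr (fun x hx => by simp [hx])
  rw [hfil]
  have halt : property_check_alt A B = B.all (pvCond A) := rfl
  rw [halt]
  by_cases hb : B.all (pvCond A) = true
  · have hnil : B.filter (fun x => !pvCond A x) = [] := by
      rw [List.filter_eq_nil_iff]
      intro a ha
      simp [List.all_eq_true.mp hb a ha]
    simp [hnil, hb, PySem.Set.len]
  · obtain ⟨x, hx, hcx⟩ : ∃ x ∈ B, ¬ pvCond A x = true := by
      simpa [List.all_eq_true] using hb
    have hmem : x ∈ B.filter (fun x => !pvCond A x) := by
      rw [List.mem_filter]
      exact ⟨hx, by simp [Bool.eq_false_iff.mpr hcx]⟩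
    have hlen : (B.filter (fun x => !pvCond A x)).length ≠ 0 := by
      intro h
      rw [List.length_eq_zero_iff] at h
      rw [h] at hmem
      simp at hmem
    have hcast : ¬ (((B.filter (fun x => !pvCond A x)).length : Int) = 0) := by
      intro h
      exact hlen (by exact_mod_cast h)
    simp only [Bool.eq_false_iff.mpr hb, PySem.Set.len]
    exact decide_eq_false hcast
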